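-- pv_equiv track=rewrite | github.com/gogaurav/ms-apriori | ms_apriori.py | check_cant_be_tog
-- ===== SOURCE A (Python) =====
-- from itertools import combinations
--
-- def check_cant_be_tog(item_set, cant_be_tog):
--     """
--     All the items in a particular set in cant_be_tog should not be in item_set.
--     If above condition holds, the item_set satisfy cannot-be-together constraint
--     :param item_set: <list> of items in a frequent item set
--     :param cant_be_tog: <list> of <list> of <list> items that cannot be together
--                         like if all combinations of 1,2 and 3 should not
--                         be together and similarly combinations of 4,5 and 6
--                         then it ll be [[[1], [2], [3], [2,3]], [[4], [5], [6], [5,6]]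
--                         if the only requirement is combinations of size 2, then it ll
--                         be [[[1], [2], [3]], [[4], [5], [6]]]
--     :return: True if item_set satisfy the cannot-be-together constraint. otherwise False
--     """
--     for lset in cant_be_tog:
--         comb_elem = list(combinations(lset, 2))
--         comb_elem = [set(i[0] + i[1]) for i in comb_elem]
--         comb_elem = [tuple(i) for i in comb_elem]
--         comb_elem = set(comb_elem)
--         for elem in comb_elem:
--             if set(elem).issubset(set(item_set)):
--                 return False
--
--     return True
-- ===== SOURCE B (Python) =====
-- def check_cant_be_tog(item_set, cant_be_tog):
--     items = set(item_set)
--     for group in cant_be_tog: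
--         if sum(1 for member in group if set(member) <= items) >= 2:
--             return False
--     return True
-- ===== Notes on version B (the rewrite author's own statement) =====
-- stated objective: simpler
-- what changed: Replaces A's enumeration of all member pairs (itertools.combinations, union, subset test per pair) with a single pass per group counting members that are individually subsets of item_set, using that a union of two members is a subset iff both are; returns False once a group has two such members.
import Mathlib
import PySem

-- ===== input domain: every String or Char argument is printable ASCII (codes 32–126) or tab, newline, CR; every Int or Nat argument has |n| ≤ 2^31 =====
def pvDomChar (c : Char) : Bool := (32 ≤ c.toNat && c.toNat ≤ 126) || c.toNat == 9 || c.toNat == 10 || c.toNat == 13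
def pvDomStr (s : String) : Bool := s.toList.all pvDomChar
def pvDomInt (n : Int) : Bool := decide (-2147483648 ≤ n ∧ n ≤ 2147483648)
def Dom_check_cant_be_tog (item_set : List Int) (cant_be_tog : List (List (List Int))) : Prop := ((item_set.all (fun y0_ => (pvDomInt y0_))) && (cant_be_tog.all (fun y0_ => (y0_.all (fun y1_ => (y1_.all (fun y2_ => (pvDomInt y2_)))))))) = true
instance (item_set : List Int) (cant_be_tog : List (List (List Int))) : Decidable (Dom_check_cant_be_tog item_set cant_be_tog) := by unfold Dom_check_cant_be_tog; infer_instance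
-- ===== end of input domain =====

-- B replaces A's pair-enumeration (combinations of 2, union, subset per pair) by a single
-- per-group pass counting members that are subsets of item_set (objective: simpler).


-- ===== PORT A =====
-- list(combinations(lset, 2)): all pairs with the first strictly earlier in the list
def pvCombs2 (l : List (List Int)) : List (List Int × List Int) :=
  match l with
  | [] => []
  | x :: xs => xs.map (fun y => (x, y)) ++ pvCombs2 xs

-- the inner loop 'for elem in comb_elem: if set(elem).issubset(set(item_set)): return False'
-- (early return False on a hit; the result does not depend on the set's iteration order)
def pvAnySubset (comb_elem : List (List Int)) (items : PySem.Set Int) : Bool :=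
  match comb_elem with
  | [] => false
  | e :: rest => if PySem.Set.issubset (PySem.Set.ofList e) items then true else pvAnySubset rest items

-- outer loop 'for lset in cant_be_tog'
def pvALoop (item_set : List Int) (groups : List (List (List Int))) : Bool :=
  match groups with
  | [] => true
  | lset :: rest =>
    -- comb_elem = set(tuple(set(i[0]+i[1])) for i in combinations(lset,2))
    let comb_elem := (pvCombs2 lset).map (fun p => PySem.Set.ofList (p.1 ++ p.2))
    let comb_set := PySem.Set.ofList comb_elem
    if pvAnySubset comb_set (PySem.Set.ofList item_set) then false else pvALoop item_set rest

def check_cant_be_tog (item_set : List Int) (cant_be_tog : List (List (List Int))) : Bool :=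
  pvALoop item_set cant_be_tog

-- ===== PORT B =====
def pvBLoop (items : PySem.Set Int) (groups : List (List (List Int))) : Bool :=
  match groups with
  | [] => true
  | group :: rest =>
    if 2 ≤ group.countP (fun member => PySem.Set.issubset (PySem.Set.ofList member) items)
    then false else pvBLoop items rest

def check_cant_be_tog_alt (item_set : List Int) (cant_be_tog : List (List (List Int))) : Bool :=
  pvBLoop (PySem.Set.ofList item_set) cant_be_tog

-- ===== PRECONDITION & SPEC =====
def Spec_check_cant_be_tog (item_set : List Int) (cant_be_tog : List (List (List Int))) (out : Bool) : Prop := out = check_cant_be_tog_alt item_set cant_be_tog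
instance (item_set : List Int) (cant_be_tog : List (List (List Int))) (out : Bool) : Decidable (Spec_check_cant_be_tog item_set cant_be_tog out) := by unfold Spec_check_cant_be_tog; infer_instance

-- ===== CLAIM (what is proved, stated in full; the proofs are below) =====
def Claim_equal_check_cant_be_tog : Prop := ∀ (item_set : List Int) (cant_be_tog : List (List (List Int))), Dom_check_cant_be_tog item_set cant_be_tog → Spec_check_cant_be_tog item_set cant_be_tog (check_cant_be_tog item_set cant_be_tog)

-- ===== LEMMAS AND PROOFS =====

-- the inner early-return loop is List.any of the subset test
theorem pvAnySubset_eq_any (l : List (List Int)) (s : PySem.Set Int) :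
    pvAnySubset l s = l.any (fun e => PySem.Set.issubset (PySem.Set.ofList e) s) := by
  induction l with
  | nil => rfl
  | cons e rest ih =>
    simp only [pvAnySubset, List.any_cons, ih]
    cases PySem.Set.issubset (PySem.Set.ofList e) s <;> simp

-- deduplicating (Python's set of tuples) does not change 'any'
theorem any_ofList (l : List (List Int)) (p : List Int → Bool) :
    (PySem.Set.ofList l).any p = l.any p := by
  rw [Bool.eq_iff_iff]
  simp only [List.any_eq_true]
  constructor
  · rintro ⟨x, hx, hp⟩; exact ⟨x, (PySem.Set.mem_ofList _ _).1 hx, hp⟩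
  · rintro ⟨x, hx, hp⟩; exact ⟨x, (PySem.Set.mem_ofList _ _).2 hx, hp⟩

-- set(a + b) (re-wrapped as a set) is a subset iff both halves are subsets
theorem pair_subset (a b : List Int) (s : PySem.Set Int) :
    PySem.Set.issubset (PySem.Set.ofList ((PySem.Set.ofList (a ++ b) : List Int))) s
      = (PySem.Set.issubset (PySem.Set.ofList a) s && PySem.Set.issubset (PySem.Set.ofList b) s) := by
  rw [Bool.eq_iff_iff]
  simp only [Bool.and_eq_true, PySem.Set.issubset_iff, PySem.Set.mem_ofList, List.mem_append]
  constructor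
  · intro h; exact ⟨fun x hx => h x (Or.inl hx), fun x hx => h x (Or.inr hx)⟩
  · rintro ⟨ha, hb⟩ x (hx | hx)
    · exact ha x hx
    · exact hb x hx

-- some pair of members is jointly good iff at least two members are good
theorem combs2_any_iff (l : List (List Int)) (q : List Int → Bool) :
    (pvCombs2 l).any (fun p => q p.1 && q p.2) = decide (2 ≤ l.countP q) := by
  induction l with
  | nil => simp [pvCombs2]
  | cons x xs ih =>
    have hany : xs.any q = decide (0 < xs.countP q) := by
      rw [Bool.eq_iff_iff]
      simp [List.any_eq_true, List.countP_pos_iff]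
    simp only [pvCombs2, List.any_append, List.any_map, Function.comp_def, List.countP_cons, ih]
    cases hx : q x with
    | false => simp
    | true =>
      simp only [Bool.true_and, if_true, hany]
      rcases xs.countP q with _ | n <;> simp

-- per-group equivalence, lifted through the two outer loops
theorem loops_eq (item_set : List Int) (groups : List (List (List Int))) :
    pvALoop item_set groups = pvBLoop (PySem.Set.ofList item_set) groups := by
  induction groups with
  | nil => rfl
  | cons g rest ih =>
    simp only [pvALoop, pvBLoop]
    rw [pvAnySubset_eq_any, any_ofList, List.any_map]
    have hfun : ((fun e => PySem.Set.issubset (PySem.Set.ofList e) (PySem.Set.ofList item_set)) ∘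
        fun p : List Int × List Int => PySem.Set.ofList (p.1 ++ p.2)) =
        fun p : List Int × List Int =>
          PySem.Set.issubset (PySem.Set.ofList p.1) (PySem.Set.ofList item_set) &&
          PySem.Set.issubset (PySem.Set.ofList p.2) (PySem.Set.ofList item_set) := by
      funext p
      exact pair_subset p.1 p.2 _
    rw [hfun, combs2_any_iff g (fun m => PySem.Set.issubset (PySem.Set.ofList m) (PySem.Set.ofList item_set))]
    by_cases h : 2 ≤ g.countP (fun m => PySem.Set.issubset (PySem.Set.ofList m) (PySem.Set.ofList item_set)) <;>
      simp [h, ih]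

-- ===== VERDICT (by name: the statement is the Claim_ definition above) =====
theorem check_cant_be_tog_spec : Claim_equal_check_cant_be_tog := by
  intro item_set cant_be_tog _
  unfold Spec_check_cant_be_tog check_cant_be_tog check_cant_be_tog_alt
  exact loops_eq item_set cant_be_tog
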